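-- pv_equiv track=rewrite | github.com/quintondpharr/CSE_415_A1 | a1_exercises.py | triple_vowels
-- ===== SOURCE A (Python) =====
-- def triple_vowels(text):
--     vowels = "aeiouAEIOU"
--     new_text = ""
--
--     for char in text:
--         if char in vowels:
--             new_text = new_text + char * 3
--         else:
--             new_text += char
--     return new_text
--
--     """Return a new version of text, with all the vowels tripled.
--     For example:  "The *BIG BAD* wolf!" => "Theee "BIIIG BAAAD* wooolf!".
--     For this exercise assume the vowels are
--     the characters A,E,I,O, and U (and a,e,i,o, and u).
--     Maintain the case of the characters."""
-- ===== SOURCE B (Python) =====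
-- def triple_vowels(text):
--     # Staged passes: one whole-string replace per vowel; correct because the
--     # replacement for a vowel contains only that vowel, so later passes
--     # (for different vowels) never touch earlier replacements.
--     for v in "aeiouAEIOU":
--         text = text.replace(v, v * 3)
--     return text
-- ===== Notes on version B (the rewrite author's own statement) =====
-- stated objective: alternative
-- what changed: Replaces the single per-character loop with branch-and-accumulator by ten staged whole-string str.replace passes, one per vowel; correct because each vowel's replacement contains only that vowel, so distinct-vowel passes commute and never rewrite each other's output.
import Mathlib
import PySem

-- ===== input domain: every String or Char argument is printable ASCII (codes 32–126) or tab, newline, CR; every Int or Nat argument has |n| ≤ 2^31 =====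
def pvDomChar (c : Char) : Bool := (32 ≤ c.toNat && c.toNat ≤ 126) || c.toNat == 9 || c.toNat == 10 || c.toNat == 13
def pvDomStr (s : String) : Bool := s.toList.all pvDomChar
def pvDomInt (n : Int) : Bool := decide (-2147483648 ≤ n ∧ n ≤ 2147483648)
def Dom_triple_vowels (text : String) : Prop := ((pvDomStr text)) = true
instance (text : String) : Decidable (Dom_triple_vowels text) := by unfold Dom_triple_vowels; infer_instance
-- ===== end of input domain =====

-- B replaces A's per-character loop with ten staged whole-string replace passes, one per vowel (alternative decomposition, same cost).


-- ===== PORT A =====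
-- Port of A: new_text accumulated left to right; 'char in vowels' is membership in
-- the vowel characters, "char * 3" is the three-char list, '+'/'+=' is append
-- (Python strings handled as their character lists, wrapped back with String.ofList).
def triple_vowels (text : String) : String :=
  String.ofList (text.toList.foldl
    (fun new_text char =>
      if char ∈ "aeiouAEIOU".toList then new_text ++ [char, char, char]
      else new_text ++ [char]) [])

-- ===== PORT B =====
-- Port of B: fold over the vowel string, each step one whole-string
-- text.replace(v, v*3) pass (PySem.Str.replace = Python's str.replace).
def triple_vowels_alt (text : String) : String :=
  "aeiouAEIOU".toList.foldl
    (fun t v => PySem.Str.replace t (String.ofList [v]) (String.ofList [v, v, v]))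
    text

-- ===== PRECONDITION & SPEC =====
def Spec_triple_vowels (text : String) (out : String) : Prop := out = triple_vowels_alt text
instance (text : String) (out : String) : Decidable (Spec_triple_vowels text out) := by unfold Spec_triple_vowels; infer_instance

-- ===== CLAIM (what is proved, stated in full; the proofs are below) =====
def Claim_equal_triple_vowels : Prop := ∀ (text : String), Dom_triple_vowels text → Spec_triple_vowels text (triple_vowels text)

-- ===== LEMMAS AND PROOFS =====

-- A single-character replace is the pointwise substitution, character by character.
theorem replace_go_single (v : Char) (new : List Char) :
    ∀ (fuel : Nat) (s acc : List Char), s.length ≤ fuel →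
      PySem.Chars.replace.go [v] new fuel s acc =
        acc.reverse ++ s.flatMap (fun c => if c = v then new else [c]) := by
  intro fuel
  induction fuel with
  | zero =>
    intro s acc h
    have hs : s = [] := List.eq_nil_of_length_eq_zero (Nat.le_zero.mp h)
    subst hs
    simp [PySem.Chars.replace.go]
  | succ n ih =>
    intro s acc h
    cases s with
    | nil => simp [PySem.Chars.replace.go]
    | cons c t =>
      have ht : t.length ≤ n := by simpa using Nat.succ_le_succ_iff.mp h
      by_cases hc : c = v
      · subst hc
        have hpre : List.isPrefixOf [c] (c :: t) = true := by
          simp [List.isPrefixOf]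
        simp only [PySem.Chars.replace.go, hpre, if_true]
        rw [show List.drop (List.length [c]) (c :: t) = t from by simp]
        rw [ih t (new.reverse ++ acc) ht]
        simp [List.flatMap_cons]
      · have hpre : List.isPrefixOf [v] (c :: t) = false := by
          simp [List.isPrefixOf]
          exact fun hv => absurd hv.symm hc
        simp only [PySem.Chars.replace.go, hpre, if_neg, Bool.false_eq_true,
          not_false_eq_true]
        rw [ih t (c :: acc) ht]
        simp [List.flatMap_cons, hc]

theorem replace_single (v : Char) (new s : List Char) :
    PySem.Chars.replace s [v] new = s.flatMap (fun c => if c = v then new else [c]) := by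
  rw [PySem.Chars.replace]
  simp only [List.isEmpty_cons, Bool.false_eq_true, if_neg, not_false_eq_true]
  simpa using replace_go_single v new s.length s [] le_rfl

-- Staged distinct-vowel passes amount to one pointwise substitution.
theorem foldl_replace_passes :
    ∀ (vs : List Char), vs.Nodup → ∀ (s : String),
      vs.foldl (fun t v => PySem.Str.replace t (String.ofList [v]) (String.ofList [v, v, v])) s =
        String.ofList (s.toList.flatMap (fun c => if c ∈ vs then [c, c, c] else [c])) := by
  intro vs
  induction vs with
  | nil =>
    intro _ s
    simp [String.ofList]
  | cons v vs ih =>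
    intro hnd s
    have hv : v ∉ vs := (List.nodup_cons.mp hnd).1
    have hvs : vs.Nodup := (List.nodup_cons.mp hnd).2
    rw [List.foldl_cons, ih hvs]
    have hstep : (PySem.Str.replace s (String.ofList [v]) (String.ofList [v, v, v])).toList =
        s.toList.flatMap (fun c => if c = v then [v, v, v] else [c]) := by
      simp [PySem.Str.replace, replace_single]
    rw [hstep, List.flatMap_assoc]
    congr 1
    congr 1
    funext c
    by_cases hc : c = v
    · subst hc
      simp [hv]
    · simp [hc]

-- ===== VERDICT (by name: the statement is the Claim_ definition above) =====
theorem triple_vowels_spec : Claim_equal_triple_vowels := by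
  intro text _
  unfold Spec_triple_vowels triple_vowels triple_vowels_alt
  have hf : (fun (new_text : List Char) (char : Char) =>
      if char ∈ "aeiouAEIOU".toList then new_text ++ [char, char, char]
      else new_text ++ [char]) =
      fun new_text char => new_text ++
        (if char ∈ "aeiouAEIOU".toList then [char, char, char] else [char]) := by
    funext a c
    split <;> rfl
  rw [hf, PySem.List.foldl_append_eq_flatMap,
    foldl_replace_passes "aeiouAEIOU".toList (by decide) text]
  simp
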